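-- pv_equiv track=rewrite | github.com/5l1v3r1/DAMM | libdamm/warnings.py | matching_lcs
-- ===== SOURCE A (Python) =====
-- def matching_lcs(a, b):
--
--     # Borrowed from http://rosettacode.org/wiki/Longest_common_subsequence#Python
--     a = a.split('.')[0]
--     b = b.split('.')[0]
--     lengths = [[0 for j in range(len(b)+1)] for i in range(len(a)+1)]
--     # row 0 and column 0 are initialized to 0 already
--     for i, x in enumerate(a):
--         for j, y in enumerate(b):
--             if x == y:
--                 lengths[i+1][j+1] = lengths[i][j] + 1
--             else:
--                 lengths[i+1][j+1] = \
--                     max(lengths[i+1][j], lengths[i][j+1])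
--     # read the substring out from the matrix
--     result = ""
--     x, y = len(a), len(b)
--     while x != 0 and y != 0:
--         if lengths[x][y] == lengths[x-1][y]:
--             x -= 1
--         elif lengths[x][y] == lengths[x][y-1]:
--             y -= 1
--         else:
--             assert a[x-1] == b[y-1]
--             result = a[x-1] + result
--             x -= 1
--             y -= 1
--     return result == a
-- ===== SOURCE B (Python) =====
-- def matching_lcs(a, b):
--     # Greedy one-pass subsequence test on the parts before the first '.':
--     # the LCS of a and b has length len(a) exactly when a is a subsequence of b.
--     a = a.split('.')[0]
--     b = b.split('.')[0]
--     i = 0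
--     for ch in b:
--         if i < len(a) and a[i] == ch:
--             i += 1
--     return i == len(a)
-- ===== Notes on version B (the rewrite author's own statement) =====
-- stated objective: faster
-- what changed: Replaced the O(n*m) LCS dynamic-programming table plus backtracking with a single greedy left-to-right pointer scan: a (before the first '.') is a subsequence of b iff the LCS equals a.
import Mathlib
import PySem

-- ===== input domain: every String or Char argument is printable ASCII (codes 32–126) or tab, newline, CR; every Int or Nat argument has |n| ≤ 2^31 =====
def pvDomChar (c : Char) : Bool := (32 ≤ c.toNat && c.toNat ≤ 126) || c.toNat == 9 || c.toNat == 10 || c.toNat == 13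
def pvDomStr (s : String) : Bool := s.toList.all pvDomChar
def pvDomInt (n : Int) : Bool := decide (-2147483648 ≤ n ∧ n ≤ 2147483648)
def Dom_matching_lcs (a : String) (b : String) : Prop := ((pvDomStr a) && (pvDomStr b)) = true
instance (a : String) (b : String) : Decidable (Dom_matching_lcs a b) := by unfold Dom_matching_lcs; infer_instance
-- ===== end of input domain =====

-- B replaces A's O(n*m) LCS table + backtracking by a one-pass greedy subsequence scan (faster).

-- ===== PORT A =====
-- lengths[x][y] (indices are always non-negative and in range in A; default never used)
def pvGet2 (L : List (List Int)) (x y : Nat) : Int := (L.getD x []).getD y 0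
-- lengths[i][j] with the Int indices produced by enumerate (always non-negative, in range)
def pvGetI (L : List (List Int)) (i j : Int) : Int := pvGet2 L i.toNat j.toNat
-- lengths[x][y] = v  (in-place update of the nested list)
def pvSet2 (L : List (List Int)) (x y : Nat) (v : Int) : List (List Int) :=
  L.set x ((L.getD x []).set y v)

-- the while loop reading the matrix back (x, y only decrease and stay ≥ 0, so Nat is exact);
-- the Python assert in the last branch provably never fires, so it has no effect and is not ported
def pvBack (L : List (List Int)) (A : List Char) : Nat → Nat → List Char → List Char
  | 0, _, result => result
  | _+1, 0, result => result
  | x+1, y+1, result =>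
    if pvGet2 L (x+1) (y+1) == pvGet2 L x (y+1) then pvBack L A x (y+1) result
    else if pvGet2 L (x+1) (y+1) == pvGet2 L (x+1) y then pvBack L A (x+1) y result
    else pvBack L A x y (A.getD x ' ' :: result)
termination_by x y _ => x + y

def matching_lcs (a : String) (b : String) : Bool :=
  let a' := (PySem.Chars.splitOn a.toList ['.']).getD 0 []   -- a = a.split('.')[0] (split is never empty)
  let b' := (PySem.Chars.splitOn b.toList ['.']).getD 0 []   -- b = b.split('.')[0]
  let lengths : List (List Int) :=
    (List.range (a'.length + 1)).map (fun _ => (List.range (b'.length + 1)).map (fun _ => (0 : Int)))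
  let lengths :=
    (PySem.List.enumerate a' 0).foldl (fun L p =>
      (PySem.List.enumerate b' 0).foldl (fun L q =>
        if p.2 == q.2 then
          pvSet2 L (p.1 + 1).toNat (q.1 + 1).toNat (pvGetI L p.1 q.1 + 1)
        else
          pvSet2 L (p.1 + 1).toNat (q.1 + 1).toNat
            (max (pvGetI L (p.1 + 1) q.1) (pvGetI L p.1 (q.1 + 1)))) L) lengths
  let result := pvBack lengths a' a'.length b'.length []
  result == a'

-- ===== PORT B =====
def matching_lcs_alt (a : String) (b : String) : Bool :=
  let a' := (PySem.Chars.splitOn a.toList ['.']).getD 0 []   -- a = a.split('.')[0]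
  let b' := (PySem.Chars.splitOn b.toList ['.']).getD 0 []   -- b = b.split('.')[0]
  -- i = 0; for ch in b: if i < len(a) and a[i] == ch: i += 1
  let i := b'.foldl (fun i ch => if i < a'.length ∧ a'.getD i ' ' = ch then i + 1 else i) 0
  i == a'.length

-- ===== PRECONDITION & SPEC =====
def Spec_matching_lcs (a : String) (b : String) (out : Bool) : Prop := out = matching_lcs_alt a b
instance (a : String) (b : String) (out : Bool) : Decidable (Spec_matching_lcs a b out) := by unfold Spec_matching_lcs; infer_instance

-- ===== CLAIM (what is proved, stated in full; the proofs are below) =====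
def Claim_equal_matching_lcs : Prop := ∀ (a : String) (b : String), Dom_matching_lcs a b → Spec_matching_lcs a b (matching_lcs a b)

-- ===== LEMMAS AND PROOFS =====

-- the LCS-length recurrence computed by A's table
def lcsF (A B : List Char) : Nat → Nat → Nat
  | 0, _ => 0
  | _+1, 0 => 0
  | i+1, j+1 =>
    if A.getD i ' ' = B.getD j ' ' then lcsF A B i j + 1
    else max (lcsF A B i (j+1)) (lcsF A B (i+1) j)
termination_by i j => i + j

theorem lcsF_le_left (A B : List Char) : ∀ N i j, i + j ≤ N → lcsF A B i j ≤ i := by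
  intro N
  induction N with
  | zero =>
    intro i j h
    have hi : i = 0 := by omega
    subst hi; simp [lcsF]
  | succ N ih =>
    intro i j h
    cases i with
    | zero => simp [lcsF]
    | succ i =>
    cases j with
    | zero => simp [lcsF]
    | succ j =>
      rw [lcsF]
      split
      · have := ih i j (by omega); omega
      · have h1 := ih i (j+1) (by omega)
        have h2 := ih (i+1) j (by omega)
        omega

-- appending one equal character to both sides preserves/reflects Sublist
theorem sublist_append_singleton_iff (l1 l2 : List Char) (c : Char) :
    (l1 ++ [c]).Sublist (l2 ++ [c]) ↔ l1.Sublist l2 := by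
  rw [← List.reverse_sublist, List.reverse_append, List.reverse_append]
  simp [List.cons_sublist_cons, List.reverse_sublist]

theorem cons_sublist_cons_of_ne {c d : Char} {t u : List Char} (h : c ≠ d)
    (h' : (c :: t).Sublist (d :: u)) : (c :: t).Sublist u := by
  cases h' with
  | cons _ h2 => exact h2
  | cons₂ => exact absurd rfl h

theorem append_singleton_sublist_of_ne {c d : Char} {l1 l2 : List Char} (h : c ≠ d)
    (h' : (l1 ++ [c]).Sublist (l2 ++ [d])) : (l1 ++ [c]).Sublist l2 := by
  rw [← List.reverse_sublist] at h' ⊢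
  simp only [List.reverse_append, List.reverse_singleton, List.singleton_append] at h' ⊢
  exact cons_sublist_cons_of_ne h h'

theorem take_succ_of_lt (A : List Char) (i : Nat) (h : i < A.length) :
    A.take (i+1) = A.take i ++ [A.getD i ' '] := by
  rw [List.take_succ]
  simp [List.getElem?_eq_getElem h, List.getD, List.getElem?_eq_getElem h]

-- the table value is full (= i) exactly when take i A is a subsequence of take j B
theorem lcsF_eq_iff (A B : List Char) : ∀ N i j, i + j ≤ N → i ≤ A.length → j ≤ B.length →
    (lcsF A B i j = i ↔ (A.take i).Sublist (B.take j)) := by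
  intro N
  induction N with
  | zero =>
    intro i j h _ _
    have hi0 : i = 0 := by omega
    subst hi0; simp [lcsF]
  | succ N ih =>
    intro i j h hi hj
    cases i with
    | zero => simp [lcsF]
    | succ i =>
    cases j with
    | zero =>
      simp only [lcsF, List.take_nil]
      constructor
      · omega
      · intro hs
        have := List.sublist_nil.mp hs
        have : (A.take (i+1)).length = 0 := by rw [this]; rfl
        rw [List.length_take] at this; omega
    | succ j =>
      have hi' : i < A.length := by omega
      have hj' : j < B.length := by omega
      rw [lcsF, take_succ_of_lt A i hi', take_succ_of_lt B j hj']
      split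
      · rename_i hc
        rw [hc, sublist_append_singleton_iff]
        have hih := ih i j (by omega) (by omega) (by omega)
        constructor
        · intro he
          exact hih.mp (by omega)
        · intro hs
          have := hih.mpr hs
          omega
      · rename_i hc
        have h1 := lcsF_le_left A B (i + (j+1)) i (j+1) le_rfl
        have h2 := ih (i+1) j (by omega) hi (by omega)
        rw [take_succ_of_lt A i hi'] at h2
        constructor
        · intro hmax
          have : lcsF A B (i+1) j = i + 1 := by omega
          exact (h2.mp this).trans (List.sublist_append_left _ _)
        · intro hs
          have := append_singleton_sublist_of_ne hc hs
          have := h2.mpr this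
          omega

-- greedy scan of B's fold: ends at full length iff the rest of A is a subsequence
theorem greedy_iff (A : List Char) : ∀ (Bs : List Char) (i : Nat), i ≤ A.length →
    (Bs.foldl (fun i ch => if i < A.length ∧ A.getD i ' ' = ch then i + 1 else i) i = A.length
      ↔ (A.drop i).Sublist Bs) := by
  intro Bs
  induction Bs with
  | nil =>
    intro i hi
    simp only [List.foldl_nil, List.sublist_nil, List.drop_eq_nil_iff]
    omega
  | cons ch bs ih =>
    intro i hi
    simp only [List.foldl_cons]
    by_cases hcond : i < A.length ∧ A.getD i ' ' = ch
    · rw [if_pos hcond, ih (i+1) (by omega)]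
      have hdrop : A.drop i = ch :: A.drop (i+1) := by
        rw [List.drop_eq_getElem_cons hcond.1]
        have hch : A[i] = ch := by
          have h2 := hcond.2
          rwa [List.getD_eq_getElem _ _ hcond.1] at h2
        rw [hch]
      rw [hdrop, List.cons_sublist_cons]
    · rw [if_neg hcond, ih i hi]
      by_cases hlen : i < A.length
      · have hne : A.getD i ' ' ≠ ch := fun he => hcond ⟨hlen, he⟩
        have hdrop : A.drop i = A.getD i ' ' :: A.drop (i+1) := by
          rw [List.drop_eq_getElem_cons hlen, List.getD_eq_getElem _ _ hlen]
        rw [hdrop]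
        constructor
        · intro hs
          exact hs.trans (List.sublist_cons_self ch bs)
        · intro hs
          exact cons_sublist_cons_of_ne hne hs
      · have hnil : A.drop i = [] := List.drop_eq_nil_iff.mpr (by omega)
        simp [hnil]

-- ===== the matrix invariant =====
def MatSpec (A B : List Char) (k j : Nat) (L : List (List Int)) : Prop :=
  L.length = A.length + 1 ∧
  (∀ r, r < A.length + 1 → (L.getD r []).length = B.length + 1) ∧
  ∀ x, x ≤ A.length → ∀ y, y ≤ B.length →
    pvGet2 L x y = if x ≤ k ∨ (x = k + 1 ∧ y ≤ j) then (lcsF A B x y : Int) else 0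

theorem lcsF_left_zero (A B : List Char) (y : Nat) : lcsF A B 0 y = 0 := by simp [lcsF]
theorem lcsF_right_zero (A B : List Char) (x : Nat) : lcsF A B x 0 = 0 := by
  cases x <;> simp [lcsF]

theorem pvGet2_pvSet2 (L : List (List Int)) (r c x y : Nat) (v : Int)
    (hr : r < L.length) (hc : c < (L.getD r []).length) :
    pvGet2 (pvSet2 L r c v) x y = if x = r ∧ y = c then v else pvGet2 L x y := by
  unfold pvGet2 pvSet2
  have hc' : c < (L[r]?.getD []).length := by simpa [List.getD_eq_getElem?_getD] using hc
  simp only [List.getD_eq_getElem?_getD, List.getElem?_set]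
  by_cases hxr : x = r
  · subst hxr
    simp only [if_pos rfl, hr, if_pos hr, Option.getD_some]
    by_cases hyc : y = c
    · subst hyc
      simp [List.getElem?_set, hc']
    · have hyc' : c ≠ y := fun h => hyc h.symm
      simp [List.getElem?_set, hyc, hyc']
  · have hxr' : r ≠ x := fun h => hxr h.symm
    simp [hxr, hxr']

theorem matspec_init (A B : List Char) :
    MatSpec A B 0 0 ((List.range (A.length + 1)).map
      (fun _ => (List.range (B.length + 1)).map (fun _ => (0 : Int)))) := by
  refine ⟨by simp, ?_, ?_⟩
  · intro r hr
    simp [List.getD_eq_getElem?_getD, List.getElem?_replicate, hr]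
  · intro x hx y hy
    have hget : pvGet2 ((List.range (A.length + 1)).map
        (fun _ => (List.range (B.length + 1)).map (fun _ => (0 : Int)))) x y = 0 := by
      unfold pvGet2
      simp [List.getD_eq_getElem?_getD, List.getElem?_replicate,
        Nat.lt_succ_of_le hx, Nat.lt_succ_of_le hy]
    rw [hget]
    split
    · rename_i hcase
      rcases hcase with h | ⟨h, hy0⟩
      · have hx0 : x = 0 := by omega
        subst hx0; simp [lcsF_left_zero]
      · subst h
        have hy0' : y = 0 := by omega
        subst hy0'; simp [lcsF_right_zero]
    · rfl

-- one inner step: writing entry (i+1, j+1)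
theorem matspec_inner_step (A B : List Char) (i j : Nat) (hi : i < A.length) (hj : j < B.length)
    (L : List (List Int)) (hL : MatSpec A B i j L) :
    MatSpec A B i (j+1)
      (if A.getD i ' ' == B.getD j ' ' then
        pvSet2 L (i+1) (j+1) (pvGet2 L i j + 1)
      else
        pvSet2 L (i+1) (j+1) (max (pvGet2 L (i+1) j) (pvGet2 L i (j+1)))) := by
  obtain ⟨hlen, hrow, hval⟩ := hL
  have hr : i + 1 < L.length := by omega
  have hc : j + 1 < (L.getD (i+1) []).length := by rw [hrow (i+1) (by omega)]; omega
  have hvij : pvGet2 L i j = (lcsF A B i j : Int) := by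
    rw [hval i (by omega) j (by omega)]; simp
  have hvi1j : pvGet2 L (i+1) j = (lcsF A B (i+1) j : Int) := by
    rw [hval (i+1) (by omega) j (by omega)]; simp
  have hvij1 : pvGet2 L i (j+1) = (lcsF A B i (j+1) : Int) := by
    rw [hval i (by omega) (j+1) (by omega)]; simp
  have hnew : (if A.getD i ' ' == B.getD j ' ' then pvGet2 L i j + 1
      else max (pvGet2 L (i+1) j) (pvGet2 L i (j+1))) = (lcsF A B (i+1) (j+1) : Int) := by
    rw [lcsF, hvij, hvi1j, hvij1]
    by_cases hch : A.getD i ' ' = B.getD j ' '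
    · rw [if_pos (beq_iff_eq.mpr hch), if_pos hch]
      push_cast; ring
    · rw [if_neg (by simpa using hch), if_neg hch]
      push_cast
      rw [max_comm]
  -- the written matrix, in either branch, is pvSet2 L (i+1) (j+1) (↑(lcsF A B (i+1) (j+1)))
  have hform : (if A.getD i ' ' == B.getD j ' ' then
        pvSet2 L (i+1) (j+1) (pvGet2 L i j + 1)
      else
        pvSet2 L (i+1) (j+1) (max (pvGet2 L (i+1) j) (pvGet2 L i (j+1))))
      = pvSet2 L (i+1) (j+1) (lcsF A B (i+1) (j+1) : Int) := by
    split <;> rename_i hch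
    · rw [← hnew, if_pos hch]
    · rw [← hnew, if_neg hch]
  rw [hform]
  refine ⟨by simp [pvSet2, hlen], ?_, ?_⟩
  · intro r hrlt
    by_cases hri : r = i + 1
    · subst hri
      unfold pvSet2
      rw [List.getD, List.getElem?_set_self (by omega)]
      simp only [Option.getD_some, List.length_set]
      exact hrow _ hrlt
    · unfold pvSet2
      rw [List.getD, List.getElem?_set_ne (fun h => hri h.symm)]
      exact hrow _ hrlt
  · intro x hx y hy
    rw [pvGet2_pvSet2 L (i+1) (j+1) x y _ hr hc]
    by_cases hxy : x = i + 1 ∧ y = j + 1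
    · rw [if_pos hxy, hxy.1, hxy.2]
      simp
    · rw [if_neg hxy, hval x hx y hy]
      split <;> rename_i hold
      · split
        · rfl
        · rename_i hnew2
          exfalso
          rcases hold with h | ⟨h, h'⟩
          · exact hnew2 (Or.inl h)
          · exact hnew2 (Or.inr ⟨h, by omega⟩)
      · split
        · rename_i hnew2
          exfalso
          rcases hnew2 with h | ⟨h, h'⟩
          · exact hold (Or.inl h)
          · have : y = j + 1 → False := fun hyj => hxy ⟨h, hyj⟩
            exact hold (Or.inr ⟨h, by omega⟩)
        · rfl

-- inner fold over the remaining enumerated suffix of B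
theorem matspec_inner_fold (A B : List Char) (i : Nat) (hi : i < A.length) :
    ∀ (l : List Char) (j : Nat), l = B.drop j → j ≤ B.length →
    ∀ L, MatSpec A B i j L →
    MatSpec A B i B.length
      ((PySem.List.enumerate l (j : Int)).foldl (fun L q =>
        if (A.getD i ' ' : Char) == q.2 then
          pvSet2 L ((i : Int) + 1).toNat (q.1 + 1).toNat (pvGetI L (i : Int) q.1 + 1)
        else
          pvSet2 L ((i : Int) + 1).toNat (q.1 + 1).toNat
            (max (pvGetI L ((i : Int) + 1) q.1) (pvGetI L (i : Int) (q.1 + 1)))) L) := by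
  intro l
  induction l with
  | nil =>
    intro j hdrop hj L hL
    have hjB : j = B.length := by
      have := congrArg List.length hdrop
      simp [List.length_drop] at this
      omega
    subst hjB
    simpa [PySem.List.enumerate_nil] using hL
  | cons c t ih =>
    intro j hdrop hj L hL
    have hjlt : j < B.length := by
      by_contra hge
      have : B.drop j = [] := List.drop_eq_nil_iff.mpr (by omega)
      rw [this] at hdrop; exact List.cons_ne_nil c t hdrop
    have hcB : c = B.getD j ' ' := by
      have := List.drop_eq_getElem_cons hjlt (l := B)
      rw [this] at hdrop
      have := hdrop.symm
      injection this with h1 h2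
      simp [List.getD, List.getElem?_eq_getElem hjlt, h1]
    have htB : t = B.drop (j+1) := by
      have := List.drop_eq_getElem_cons hjlt (l := B)
      rw [this] at hdrop
      injection hdrop.symm with h1 h2
      exact h2.symm
    rw [PySem.List.enumerate_cons, List.foldl_cons]
    dsimp only
    have hstep := matspec_inner_step A B i j hi hjlt L hL
    -- normalise the Int index arithmetic in the step applied by the fold
    have hidx1 : ((i : Int) + 1).toNat = i + 1 := by omega
    have hidx2 : ((j : Int) + 1).toNat = j + 1 := by omega
    have happ : (if (A.getD i ' ' : Char) == c then
          pvSet2 L ((i : Int) + 1).toNat (((j : Int)) + 1).toNat (pvGetI L (i : Int) (j : Int) + 1)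
        else
          pvSet2 L ((i : Int) + 1).toNat (((j : Int)) + 1).toNat
            (max (pvGetI L ((i : Int) + 1) (j : Int)) (pvGetI L (i : Int) ((j : Int) + 1))))
        = (if A.getD i ' ' == B.getD j ' ' then
            pvSet2 L (i+1) (j+1) (pvGet2 L i j + 1)
          else
            pvSet2 L (i+1) (j+1) (max (pvGet2 L (i+1) j) (pvGet2 L i (j+1)))) := by
      rw [hcB]
      unfold pvGetI
      rw [hidx1, hidx2]
      simp [Int.toNat_natCast]
    rw [happ]
    have := ih (j+1) htB (by omega) _ hstep
    have hcast : ((j : Int) + 1) = ((j + 1 : Nat) : Int) := by push_cast; ring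
    rw [hcast]
    exact this

-- row handoff: finishing row i+1 starts row i+2 at column 0
theorem matspec_handoff (A B : List Char) (i : Nat) (L : List (List Int))
    (hL : MatSpec A B i B.length L) : MatSpec A B (i+1) 0 L := by
  obtain ⟨h1, h2, h3⟩ := hL
  refine ⟨h1, h2, ?_⟩
  intro x hx y hy
  rw [h3 x hx y hy]
  split <;> rename_i hold
  · rw [if_pos]
    rcases hold with h | ⟨h, _⟩
    · exact Or.inl (by omega)
    · exact Or.inl (by omega)
  · split
    · rename_i hnew
      rcases hnew with h | ⟨h, hy0⟩
      · exfalso; exact hold (by omega)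
      · interval_cases y
        simp [lcsF_right_zero]
    · rfl

-- past the last row nothing changes: MatSpec i 0 for i ≥ n gives MatSpec n 0
theorem matspec_mono (A B : List Char) (i : Nat) (hin : A.length ≤ i) (L : List (List Int))
    (hL : MatSpec A B i 0 L) : MatSpec A B A.length 0 L := by
  obtain ⟨h1, h2, h3⟩ := hL
  refine ⟨h1, h2, ?_⟩
  intro x hx y hy
  rw [h3 x hx y hy, if_pos (Or.inl (by omega)), if_pos (Or.inl (by omega))]

-- outer fold over the remaining enumerated suffix of A
theorem matspec_outer_fold (A B : List Char) :
    ∀ (l : List Char) (i : Nat), l = A.drop i → ∀ L, MatSpec A B i 0 L →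
    MatSpec A B A.length 0
      ((PySem.List.enumerate l (i : Int)).foldl (fun L p =>
        (PySem.List.enumerate B 0).foldl (fun L q =>
          if p.2 == q.2 then
            pvSet2 L (p.1 + 1).toNat (q.1 + 1).toNat (pvGetI L p.1 q.1 + 1)
          else
            pvSet2 L (p.1 + 1).toNat (q.1 + 1).toNat
              (max (pvGetI L (p.1 + 1) q.1) (pvGetI L p.1 (q.1 + 1)))) L) L) := by
  intro l
  induction l with
  | nil =>
    intro i hdrop L hL
    have : A.length ≤ i := by
      by_contra hlt
      have : A.drop i ≠ [] := by
        intro h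
        have := List.drop_eq_nil_iff.mp h
        omega
      exact this hdrop.symm
    simpa [PySem.List.enumerate_nil] using matspec_mono A B i this L hL
  | cons c t ih =>
    intro i hdrop L hL
    have hilt : i < A.length := by
      by_contra hge
      have : A.drop i = [] := List.drop_eq_nil_iff.mpr (by omega)
      rw [this] at hdrop; exact List.cons_ne_nil c t hdrop
    have hcA : c = A.getD i ' ' := by
      have := List.drop_eq_getElem_cons hilt (l := A)
      rw [this] at hdrop
      injection hdrop.symm with h1 h2
      simp [List.getD, List.getElem?_eq_getElem hilt, h1]
    have htA : t = A.drop (i+1) := by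
      have := List.drop_eq_getElem_cons hilt (l := A)
      rw [this] at hdrop
      injection hdrop.symm with h1 h2
      exact h2.symm
    rw [PySem.List.enumerate_cons, List.foldl_cons]
    dsimp only
    have hinner := matspec_inner_fold A B i hilt B 0 (by simp) (by omega) L hL
    simp only [Nat.cast_zero] at hinner
    rw [hcA]
    have hstep := matspec_handoff A B i _ hinner
    have hcast : ((i : Int) + 1) = ((i + 1 : Nat) : Int) := by push_cast; ring
    rw [hcast]
    exact ih (i+1) htA _ hstep

-- in the last branch of the while loop the characters match and the entry is diagonal + 1
theorem lcsF_branch (A B : List Char) (x y : Nat)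
    (h1 : lcsF A B (x+1) (y+1) ≠ lcsF A B x (y+1))
    (h2 : lcsF A B (x+1) (y+1) ≠ lcsF A B (x+1) y) :
    A.getD x ' ' = B.getD y ' ' ∧ lcsF A B (x+1) (y+1) = lcsF A B x y + 1 := by
  by_cases hch : A.getD x ' ' = B.getD y ' '
  · exact ⟨hch, by rw [lcsF, if_pos hch]⟩
  · exfalso
    have : lcsF A B (x+1) (y+1) = max (lcsF A B x (y+1)) (lcsF A B (x+1) y) := by
      rw [lcsF, if_neg hch]
    rcases max_choice (lcsF A B x (y+1)) (lcsF A B (x+1) y) with h | h <;> omega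

-- backtracking returns a common-subsequence prefix of length lcsF n m, prepended to result
theorem pvBack_spec (L : List (List Int)) (A B : List Char)
    (hL : ∀ x, x ≤ A.length → ∀ y, y ≤ B.length → pvGet2 L x y = (lcsF A B x y : Int)) :
    ∀ N x y, x + y ≤ N → x ≤ A.length → y ≤ B.length → ∀ r,
    ∃ s, pvBack L A x y r = s ++ r ∧ s.Sublist (A.take x) ∧ s.length = lcsF A B x y := by
  intro N
  induction N with
  | zero =>
    intro x y h hx hy r
    have hx0 : x = 0 := by omega
    subst hx0
    exact ⟨[], by simp [pvBack], by simp, by simp [lcsF]⟩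
  | succ N ih =>
    intro x y h hx hy r
    cases x with
    | zero => exact ⟨[], by simp [pvBack], by simp, by simp [lcsF]⟩
    | succ x =>
    cases y with
    | zero => exact ⟨[], by simp [pvBack], by simp, by simp [lcsF_right_zero]⟩
    | succ y =>
      rw [pvBack]
      rw [hL (x+1) hx (y+1) hy, hL x (by omega) (y+1) hy, hL (x+1) hx y (by omega)]
      by_cases hb1 : lcsF A B (x+1) (y+1) = lcsF A B x (y+1)
      · rw [if_pos (by exact_mod_cast beq_iff_eq.mpr (by exact_mod_cast hb1))]
        obtain ⟨s, hs1, hs2, hs3⟩ := ih x (y+1) (by omega) (by omega) hy r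
        refine ⟨s, hs1, ?_, by omega⟩
        have : A.take x = (A.take (x+1)).take x := by
          rw [List.take_take]; congr 1; omega
        exact hs2.trans (this ▸ (List.take_sublist x (A.take (x+1))))
      · rw [if_neg (by simpa using fun h => hb1 (by exact_mod_cast h))]
        by_cases hb2 : lcsF A B (x+1) (y+1) = lcsF A B (x+1) y
        · rw [if_pos (by exact_mod_cast beq_iff_eq.mpr (by exact_mod_cast hb2))]
          obtain ⟨s, hs1, hs2, hs3⟩ := ih (x+1) y (by omega) hx (by omega) r
          exact ⟨s, hs1, hs2, by omega⟩
        · rw [if_neg (by simpa using fun h => hb2 (by exact_mod_cast h))]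
          obtain ⟨hch, hdiag⟩ := lcsF_branch A B x y hb1 hb2
          obtain ⟨s, hs1, hs2, hs3⟩ := ih x y (by omega) (by omega) (by omega)
            (A.getD x ' ' :: r)
          refine ⟨s ++ [A.getD x ' '], by rw [hs1]; simp, ?_, by simp [hs3, hdiag]⟩
          rw [take_succ_of_lt A x (by omega)]
          exact hs2.append (List.Sublist.refl _)

-- a sublist of full length is the whole list
theorem sublist_full_eq {s A : List Char} (hs : s.Sublist A) (hl : s.length = A.length) : s = A :=
  hs.eq_of_length hl

-- the core equivalence on the split-off prefixes
theorem core_eq (A B : List Char) :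
    (pvBack ((PySem.List.enumerate A 0).foldl (fun L p =>
      (PySem.List.enumerate B 0).foldl (fun L q =>
        if p.2 == q.2 then
          pvSet2 L (p.1 + 1).toNat (q.1 + 1).toNat (pvGetI L p.1 q.1 + 1)
        else
          pvSet2 L (p.1 + 1).toNat (q.1 + 1).toNat
            (max (pvGetI L (p.1 + 1) q.1) (pvGetI L p.1 (q.1 + 1)))) L)
      ((List.range (A.length + 1)).map
        (fun _ => (List.range (B.length + 1)).map (fun _ => (0 : Int)))))
      A A.length B.length [] == A)
    = (B.foldl (fun i ch => if i < A.length ∧ A.getD i ' ' = ch then i + 1 else i) 0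
        == A.length) := by
  have hfold := matspec_outer_fold A B A 0 (by simp) _ (matspec_init A B)
  have hz : ((0 : Nat) : Int) = (0 : Int) := rfl
  rw [hz] at hfold
  obtain ⟨-, -, hval⟩ := hfold
  obtain ⟨s, hs1, hs2, hs3⟩ := pvBack_spec _ A B
    (fun x hx y hy => by rw [hval x hx y hy, if_pos (Or.inl hx)])
    (A.length + B.length) A.length B.length le_rfl le_rfl le_rfl []
  rw [List.append_nil] at hs1
  rw [hs1]
  have hsub : s.Sublist A := by simpa using hs2
  have hiff1 : s = A ↔ lcsF A B A.length B.length = A.length := by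
    constructor
    · intro he; rw [← hs3, he]
    · intro he
      exact sublist_full_eq hsub (by rw [hs3, he])
  have hiff2 : lcsF A B A.length B.length = A.length ↔ A.Sublist B := by
    have := lcsF_eq_iff A B (A.length + B.length) A.length B.length le_rfl le_rfl le_rfl
    simpa using this
  have hiff3 := greedy_iff A B 0 (by omega)
  simp only [List.drop_zero] at hiff3
  apply Bool.coe_iff_coe.mp
  simp only [beq_iff_eq]
  rw [hiff1, hiff2, ← hiff3]

-- ===== VERDICT (by name: the statement is the Claim_ definition above) =====
theorem matching_lcs_spec : Claim_equal_matching_lcs := by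
  intro a b _
  unfold Spec_matching_lcs matching_lcs matching_lcs_alt
  exact core_eq _ _
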